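-- pv_equiv track=rewrite | github.com/WallerTsai/OJ-Solution | leetcode-py/数据结构/线段树/No2213.py | longestRepeating
-- ===== SOURCE A (Python) =====
-- from typing import List
--
-- class LazySegmentTree:
--     __slots__ = ('op', 'e', 'mapping', 'composition', 'id',
--                  'n', 'height', 'size', 'tree', 'lazy')
--
--     def __init__(self, op, e, mapping, composition, id_, v):
--         self.op, self.e, self.mapping, self.composition, self.id = op, e, mapping, composition, id_
--         self.n = len(v)
--         self.height = (self.n - 1).bit_length()
--         self.size = 1 << self.height
--         self.tree = [e] * (2 * self.size)
--         self.lazy = [id_] * self.size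
--         for i in range(self.n): self.tree[self.size + i] = v[i]
--         for i in range(self.size - 1, 0, -1): self._pushup(i)
--
--     def _pushup(self, k):
--         self.tree[k] = self.op(self.tree[2 * k], self.tree[2 * k + 1])
--
--     def _apply_lazy(self, k, f):
--         self.tree[k] = self.mapping(f, self.tree[k])
--         if k < self.size:
--             self.lazy[k] = self.composition(f, self.lazy[k])
--
--     def _pushdown(self, k):
--         f = self.lazy[k]
--         if f != self.id:
--             self._apply_lazy(2 * k, f)
--             self._apply_lazy(2 * k + 1, f)
--             self.lazy[k] = self.id
--
--     def set(self, p, x):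
--         p += self.size
--         for i in range(self.height, 0, -1): self._pushdown(p >> i)
--         self.tree[p] = x
--         for i in range(1, self.height + 1): self._pushup(p >> i)
--
--     def all(self):
--         return self.tree[1]
--
-- def longestRepeating(s: str, queryCharacters: str, queryIndices: List[int]) -> List[int]:
--     n = len(s)
--
--     # 1. 定义 Data 结构: (max_l, pre_l, pre_c, suf_l, suf_c, size)
--     def make_data(char):
--         return (1, 1, char, 1, char, 1)
--
--     # 2. 定义 op (合并逻辑)
--     def op(L, R):
--         # 处理单位元情况
--         if L[5] == 0: return R
--         if R[5] == 0: return L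
--
--         # a. 基础继承左右子区间的最大值
--         res_max = L[0] if L[0] > R[0] else R[0]
--
--         # b. 中间字符相同，尝试合并跨界长度
--         if L[4] == R[2]:
--             combined = L[3] + R[1]
--             if combined > res_max: res_max = combined
--
--         # c. 维护新的 pre_l (左边界连续长度)
--         res_pre = L[1]
--         if L[1] == L[5] and L[4] == R[2]:
--             res_pre = L[5] + R[1]
--
--         # d. 维护新的 suf_l (右边界连续长度)
--         res_suf = R[3]
--         if R[3] == R[5] and R[2] == L[4]:
--             res_suf = R[5] + L[3]
--
--         return (res_max, res_pre, L[2], res_suf, R[4], L[5] + R[5])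
--
--     # 3. 线段树其他要素
--     e = (0, 0, '', 0, '', 0)
--     mapping = lambda f, data: data        # 单点修改不需要映射
--     composition = lambda f, g: f          # 不需要标记合并
--     id_lazy = None                        # 无标记
--
--     # 4. 初始化
--     init_v = [make_data(c) for c in s]
--     st = LazySegmentTree(op, e, mapping, composition, id_lazy, init_v)
--
--     # 5. 处理查询
--     ans = []
--     for i in range(len(queryIndices)):
--         idx = queryIndices[i]
--         char = queryCharacters[i]
--
--         # 执行单点修改
--         st.set(idx, make_data(char))
--
--         # 获取全局最大值 (根节点数据的第一个元素)
--         ans.append(st.all()[0])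
--
--     return ans
-- ===== SOURCE B (Python) =====
-- from typing import List
--
-- # B: no persistent tree. Keep the current characters in a list; for each query
-- # write the character, then recompute the answer from scratch with a top-down
-- # recursive divide-and-conquer over a virtual complete binary tree
-- # (identical node summaries (max_l, pre_l, pre_c, suf_l, suf_c, size)).
--
-- E = (0, 0, '', 0, '', 0)
--
-- def merge(L, R):
--     if L[5] == 0: return R
--     if R[5] == 0: return L
--     res_max = L[0] if L[0] > R[0] else R[0]
--     if L[4] == R[2]:
--         combined = L[3] + R[1]
--         if combined > res_max: res_max = combined
--     res_pre = L[1]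
--     if L[1] == L[5] and L[4] == R[2]:
--         res_pre = L[5] + R[1]
--     res_suf = R[3]
--     if R[3] == R[5] and R[2] == L[4]:
--         res_suf = R[5] + L[3]
--     return (res_max, res_pre, L[2], res_suf, R[4], L[5] + R[5])
--
-- def longestRepeating(s: str, queryCharacters: str, queryIndices: List[int]) -> List[int]:
--     chars = list(s)
--     n = len(chars)
--     h = 0
--     while (1 << h) < n:
--         h += 1
--
--     def go(d, j):
--         # node at depth h-d covering leaves [j*2^d, (j+1)*2^d)
--         if d == 0:
--             if j < n:
--                 c = chars[j]
--                 return (1, 1, c, 1, c, 1)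
--             return E
--         return merge(go(d - 1, 2 * j), go(d - 1, 2 * j + 1))
--
--     ans = []
--     for idx, ch in zip(queryIndices, queryCharacters):
--         chars[idx] = ch
--         ans.append(go(h, 0)[0])
--     return ans
-- ===== Notes on version B (the rewrite author's own statement) =====
-- stated objective: simpler
-- what changed: Replaces the iterative zkw lazy segment tree (array storage, inert lazy machinery, bit-shift path updates) by a stateless per-query recompute: write the character into a plain list and recursively fold the same node summaries top-down over a virtual complete binary tree.
-- outside the precondition, e.g. on longestRepeating('abc', 'c', [3]): A returns [2], B raises IndexError; on longestRepeating('ab', 'a', [-1]): A returns [1], B returns [2]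
import Mathlib
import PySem

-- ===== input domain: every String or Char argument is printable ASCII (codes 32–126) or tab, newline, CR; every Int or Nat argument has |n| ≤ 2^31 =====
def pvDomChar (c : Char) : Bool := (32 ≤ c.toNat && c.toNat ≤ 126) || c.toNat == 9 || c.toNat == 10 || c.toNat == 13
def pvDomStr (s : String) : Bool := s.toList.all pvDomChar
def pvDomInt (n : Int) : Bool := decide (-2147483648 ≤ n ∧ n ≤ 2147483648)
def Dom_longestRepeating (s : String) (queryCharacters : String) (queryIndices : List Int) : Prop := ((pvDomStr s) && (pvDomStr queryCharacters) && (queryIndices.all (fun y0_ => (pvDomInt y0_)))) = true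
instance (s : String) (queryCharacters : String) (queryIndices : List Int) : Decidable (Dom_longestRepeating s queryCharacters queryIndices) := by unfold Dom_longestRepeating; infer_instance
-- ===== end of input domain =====

-- B replaces A's iterative zkw lazy segment tree by a stateless per-query recursive
-- recompute of the same run-summaries (objective: simpler; not faster).

-- shared node summary (max_l, pre_l, pre_c, suf_l, suf_c, size); chars are 1-char strings
structure Node where
  maxL : Int
  preL : Int
  preC : String
  sufL : Int
  sufC : String
  size : Int
deriving DecidableEq, Repr

def eNode : Node := ⟨0, 0, "", 0, "", 0⟩

def mkData (c : String) : Node := ⟨1, 1, c, 1, c, 1⟩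

-- op(L, R) — shared by both ports (identical merge logic in Source A and Source B)
def mergeNode (L R : Node) : Node :=
  if L.size = 0 then R
  else if R.size = 0 then L
  else
    let resMax0 := if L.maxL > R.maxL then L.maxL else R.maxL
    let resMax := if L.sufC = R.preC then
        (if L.sufL + R.preL > resMax0 then L.sufL + R.preL else resMax0)
      else resMax0
    let resPre := if L.preL = L.size ∧ L.sufC = R.preC then L.size + R.preL else L.preL
    let resSuf := if R.sufL = R.size ∧ R.preC = L.sufC then R.size + L.sufL else R.sufL
    ⟨resMax, resPre, L.preC, resSuf, R.sufC, L.size + R.size⟩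

-- ===== PORT A =====

-- tree[k] / lazy[k] reads and writes; exact for in-range indices (guaranteed under Pre_)
def tgetA (t : List Node) (i : Int) : Node := PySem.List.pyGetD t i eNode
def lgetA (l : List (Option Unit)) (i : Int) : Option Unit := PySem.List.pyGetD l i none

-- _apply_lazy: mapping f data = data, composition f g = f
def applyA (size : Int) (t : List Node) (l : List (Option Unit)) (k : Int) (f : Option Unit) :
    List Node × List (Option Unit) :=
  (PySem.List.pySetD t k (tgetA t k), if k < size then PySem.List.pySetD l k f else l)

def pushdownA (size : Int) (t : List Node) (l : List (Option Unit)) (k : Int) :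
    List Node × List (Option Unit) :=
  let f := lgetA l k
  if f ≠ none then
    let tl := applyA size t l (2 * k) f
    let tl2 := applyA size tl.1 tl.2 (2 * k + 1) f
    (tl2.1, PySem.List.pySetD tl2.2 k none)
  else (t, l)

def pushupA (t : List Node) (k : Int) : List Node :=
  PySem.List.pySetD t k (mergeNode (tgetA t (2 * k)) (tgetA t (2 * k + 1)))

-- LazySegmentTree.set(p, x)
def setA (size : Int) (height : Nat) (t : List Node) (l : List (Option Unit)) (p0 : Int)
    (x : Node) : List Node × List (Option Unit) :=
  let p := p0 + size
  let tl := (PySem.List.pyRange (height : Int) 0 (-1)).foldl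
      (fun tl i => pushdownA size tl.1 tl.2 (p >>> i.toNat)) (t, l)
  let t2 := PySem.List.pySetD tl.1 p x
  let t3 := (PySem.List.pyRange 1 ((height : Int) + 1) 1).foldl
      (fun t i => pushupA t (p >>> i.toNat)) t2
  (t3, tl.2)

def longestRepeating (s : String) (queryCharacters : String) (queryIndices : List Int) :
    List Int :=
  let initV : List Node := s.toList.map (fun c => mkData (String.ofList [c]))
  let nI : Int := PySem.List.len initV           -- self.n = len(v) (= len(s))
  let height : Nat := PySem.Int.bitLength (nI - 1)
  let size : Int := 1 <<< height
  let t0 : List Node := PySem.List.pyRepeat [eNode] (2 * size)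
  let l0 : List (Option Unit) := PySem.List.pyRepeat [(none : Option Unit)] size
  let t1 := (PySem.List.pyRange 0 nI 1).foldl
      (fun t i => PySem.List.pySetD t (size + i) (PySem.List.pyGetD initV i eNode)) t0
  let t2 := (PySem.List.pyRange (size - 1) 0 (-1)).foldl (fun t i => pushupA t i) t1
  ((PySem.List.pyRange 0 (PySem.List.len queryIndices) 1).foldl
    (fun st i =>
      let idx := PySem.List.pyGetD queryIndices i 0          -- queryIndices[i]
      let ch := PySem.List.pyGetD queryCharacters.toList i ' '  -- queryCharacters[i]
      let tl := setA size height st.1 st.2.1 idx (mkData (String.ofList [ch]))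
      (tl.1, tl.2, st.2.2 ++ [(tgetA tl.1 1).maxL]))
    (t2, l0, ([] : List Int))).2.2

-- ===== PORT B =====

-- h = 0; while (1 << h) < n: h += 1
def pow2Loop (n h : Nat) : Nat :=
  if 1 <<< h < n then pow2Loop n (h + 1) else h
  termination_by n - (1 <<< h)
  decreasing_by
    simp only [Nat.one_shiftLeft] at *
    have : 2 ^ h < 2 ^ (h + 1) := Nat.pow_lt_pow_right (by norm_num) (by omega)
    omega

-- go(d, j): recursive summary of the virtual subtree of height d at offset j
def goB (chars : List Char) (n : Nat) : Nat → Nat → Node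
  | 0, j => if j < n then mkData (String.ofList [chars.getD j ' ']) else eNode
  | d + 1, j => mergeNode (goB chars n d (2 * j)) (goB chars n d (2 * j + 1))

def longestRepeating_alt (s : String) (queryCharacters : String) (queryIndices : List Int) :
    List Int :=
  let n := s.toList.length
  let h := pow2Loop n 0
  ((queryIndices.zip queryCharacters.toList).foldl
    (fun st q =>
      let cs := PySem.List.pySetD st.1 q.1 q.2     -- chars[idx] = ch
      (cs, st.2 ++ [(goB cs n h 0).maxL]))
    (s.toList, ([] : List Int))).2

-- ===== PRECONDITION & SPEC =====
-- Pre_ excludes inputs where A raises IndexError (queryIndices longer than queryCharacters,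
-- or an index far out of range), and out-of-range indices in [n, size) or negative on which
-- A still returns a value only after silently writing into a padding leaf or an internal
-- tree node — an accident of the array layout that no caller would specify.
def Pre_longestRepeating (s : String) (queryCharacters : String) (queryIndices : List Int) :
    Prop :=
  queryIndices.length ≤ queryCharacters.toList.length ∧
    ∀ i ∈ queryIndices, 0 ≤ i ∧ i < (s.toList.length : Int)
instance (s : String) (queryCharacters : String) (queryIndices : List Int) :
    Decidable (Pre_longestRepeating s queryCharacters queryIndices) := by
  unfold Pre_longestRepeating; infer_instance

def pvWitness_longestRepeating : String × String × List Int := ("aab", "ba", [0, 2])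

def Spec_longestRepeating (s : String) (queryCharacters : String) (queryIndices : List Int) (out : List Int) : Prop := out = longestRepeating_alt s queryCharacters queryIndices
instance (s : String) (queryCharacters : String) (queryIndices : List Int) (out : List Int) : Decidable (Spec_longestRepeating s queryCharacters queryIndices out) := by unfold Spec_longestRepeating; infer_instance

-- ===== CLAIM (what is proved, stated in full; the proofs are below) =====
def Claim_equal_longestRepeating : Prop := ∀ (s : String) (queryCharacters : String) (queryIndices : List Int), Dom_longestRepeating s queryCharacters queryIndices → Pre_longestRepeating s queryCharacters queryIndices → Spec_longestRepeating s queryCharacters queryIndices (longestRepeating s queryCharacters queryIndices)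

-- ===== LEMMAS AND PROOFS =====

-- leaf summary of one character
def leafOf (c : Char) : Node := mkData (String.ofList [c])

-- the padded leaf row: real characters then identity padding up to m
def lsOf (cs : List Char) (m : Nat) : List Node :=
  cs.map leafOf ++ List.replicate (m - cs.length) eNode

-- tree read at a Nat index
def tg (t : List Node) (k : Nat) : Node := t.getD k eNode

-- reference value of heap node k over leaf row ls (m = number of leaves)
def hv (m : Nat) (ls : List Node) (k : Nat) : Node :=
  if _h1 : k = 0 then eNode
  else if _h2 : m ≤ k then ls.getD (k - m) eNode
  else mergeNode (hv m ls (2 * k)) (hv m ls (2 * k + 1))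
  termination_by 2 * m - k
  decreasing_by all_goals omega

lemma hv_leaf (m : Nat) (ls : List Node) (k : Nat) (h1 : k ≠ 0) (h2 : m ≤ k) :
    hv m ls k = ls.getD (k - m) eNode := by
  rw [hv, dif_neg h1, dif_pos h2]

lemma hv_node (m : Nat) (ls : List Node) (k : Nat) (h1 : k ≠ 0) (h2 : k < m) :
    hv m ls k = mergeNode (hv m ls (2 * k)) (hv m ls (2 * k + 1)) := by
  rw [hv, dif_neg h1, dif_neg (by omega : ¬ m ≤ k)]

lemma tg_set (t : List Node) (j k : Nat) (x : Node) :
    tg (t.set j x) k = if j = k ∧ j < t.length then x else tg t k := by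
  simp only [tg, List.getD_eq_getElem?_getD]
  by_cases hjk : j = k
  · subst hjk
    by_cases hj : j < t.length
    · simp [List.getElem?_set, hj]
    · simp [List.getElem?_set, hj, List.getElem?_eq_none_iff.mpr (by omega : t.length ≤ j)]
  · simp [List.getElem?_set, hjk]

lemma tgetA_nat (t : List Node) (k : Nat) : tgetA t (k : Int) = tg t k := by
  simp [tgetA, tg]

-- ---- arithmetic about the update path ----

lemma shift_int2 (a i : Nat) : ((a : Int)) >>> ((i : Int)) = ((a >>> i : Nat) : Int) :=
  Int.shiftRight_natCast a i

lemma anc_bounds {h p : Nat} (i : Nat) (hp : p < 2 ^ h) (hi : i ≤ h) :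
    2 ^ (h - i) ≤ (p + 2 ^ h) >>> i ∧ (p + 2 ^ h) >>> i < 2 ^ (h - i) * 2 := by
  have hpow : (0:Nat) < 2 ^ i := Nat.two_pow_pos i
  have hsplit : 2 ^ (h - i) * 2 ^ i = 2 ^ h := by
    rw [← pow_add]; congr 1; omega
  rw [Nat.shiftRight_eq_div_pow]
  constructor
  · rw [Nat.le_div_iff_mul_le hpow, hsplit]; omega
  · rw [Nat.div_lt_iff_lt_mul hpow]
    calc p + 2 ^ h < 2 ^ h + 2 ^ h := by omega
    _ = 2 ^ (h - i) * 2 * 2 ^ i := by rw [mul_assoc, mul_comm 2 (2^i), ← mul_assoc, hsplit]; ring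

lemma anc_high {h p : Nat} (i : Nat) (hp : p < 2 ^ h) (hi : h < i) :
    (p + 2 ^ h) >>> i = 0 := by
  rw [Nat.shiftRight_eq_div_pow]
  apply Nat.div_eq_of_lt
  calc p + 2 ^ h < 2 ^ h + 2 ^ h := by omega
  _ = 2 ^ (h + 1) := by ring
  _ ≤ 2 ^ i := Nat.pow_le_pow_right (by norm_num) (by omega)

-- a node in the dyadic band of level r is not an ancestor at any strictly higher level
lemma band_not_anc {h p : Nat} (hp : p < 2 ^ h) {c r : Nat} (hr : r ≤ h)
    (hc : 2 ^ (h - r) ≤ c) : ∀ i, r < i → i ≤ h → c ≠ (p + 2 ^ h) >>> i := by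
  intro i hi1 hi2 heq
  have hb := (anc_bounds i hp hi2).2
  have : 2 ^ (h - i) * 2 ≤ 2 ^ (h - r) := by
    have : 2 ^ (h - i) * 2 = 2 ^ (h - i + 1) := by ring
    rw [this]
    exact Nat.pow_le_pow_right (by norm_num) (by omega)
  omega

-- ---- hv only depends on the leaves below a node ----

lemma hv_indep (m : Nat) (ls : List Node) (p : Nat) (x : Node) :
    ∀ (F k : Nat), 2 * m - k ≤ F → 1 ≤ k → (∀ i : Nat, k ≠ (p + m) >>> i) →
      hv m (ls.set p x) k = hv m ls k := by
  intro F
  induction F with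
  | zero =>
    intro k hF h1 hanc
    have hk : m ≤ k := by omega
    have hk0 : k ≠ 0 := by omega
    rw [hv_leaf _ _ _ hk0 hk, hv_leaf _ _ _ hk0 hk]
    have hne : p ≠ k - m := by
      intro he; exact hanc 0 (by simp [he]; omega)
    simp [List.getD_eq_getElem?_getD, List.getElem?_set, hne]
  | succ F ih =>
    intro k hF h1 hanc
    by_cases hk : m ≤ k
    · have hk0 : k ≠ 0 := by omega
      rw [hv_leaf _ _ _ hk0 hk, hv_leaf _ _ _ hk0 hk]
      have hne : p ≠ k - m := by
        intro he; exact hanc 0 (by simp [he]; omega)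
      simp [List.getD_eq_getElem?_getD, List.getElem?_set, hne]
    · push_neg at hk
      have hk0 : k ≠ 0 := by omega
      rw [hv_node _ _ _ hk0 hk, hv_node _ _ _ hk0 hk]
      have hch : ∀ c : Nat, c / 2 = k → (∀ i, c ≠ (p + m) >>> i) := by
        intro c hc i heq
        exact hanc (i + 1) (by rw [Nat.shiftRight_succ, ← heq, hc])
      rw [ih (2 * k) (by omega) (by omega) (hch (2 * k) (by omega)),
          ih (2 * k + 1) (by omega) (by omega) (hch (2 * k + 1) (by omega))]

-- ---- the pushdown loop is the identity (lazy is everywhere none) ----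

lemma pushdownA_id (size : Int) (t : List Node) (M : Nat) (k : Int) :
    pushdownA size t (List.replicate M none) k = (t, List.replicate M none) := by
  have hl : lgetA (List.replicate M none) k = none := by
    unfold lgetA PySem.List.pyGetD
    rcases hc : PySem.List.pyGet? (List.replicate M (none : Option Unit)) k with _ | v
    · rfl
    · have hmem : v ∈ List.replicate M (none : Option Unit) :=
        PySem.List.mem_of_pyGet?_eq_some (xs := List.replicate M (none : Option Unit))
          (i := k) hc
      simp [List.eq_of_mem_replicate hmem]
  simp [pushdownA, hl]

lemma pushdown_fold_id (L : List Int) (size : Int) (t : List Node) (M : Nat)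
    (f : Int → Int) :
    L.foldl (fun tl i => pushdownA size tl.1 tl.2 (f i)) (t, List.replicate M none)
      = (t, List.replicate M none) := by
  induction L generalizing t with
  | nil => rfl
  | cons a L ih => simp only [List.foldl_cons, pushdownA_id]; exact ih t

-- ---- the leaf-writing loop of the constructor ----

lemma leaf_fold (v : List Node) (m : Nat) :
    ∀ (nn : Nat) (t : List Node),
      ((List.range nn).foldl (fun t i => t.set (m + i) (v.getD i eNode)) t).length
          = t.length ∧
      ∀ k, tg ((List.range nn).foldl (fun t i => t.set (m + i) (v.getD i eNode)) t) k
          = if m ≤ k ∧ k < m + nn ∧ k < t.length then v.getD (k - m) eNode else tg t k := by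
  intro nn
  induction nn with
  | zero =>
    intro t
    refine ⟨rfl, fun k => ?_⟩
    rw [List.range_zero, List.foldl_nil, if_neg (by omega : ¬ (m ≤ k ∧ k < m + 0 ∧ k < t.length))]
  | succ nn ih =>
    intro t
    rw [List.range_succ, List.foldl_append, List.foldl_cons, List.foldl_nil]
    obtain ⟨hTlen, htg⟩ := ih t
    set T := (List.range nn).foldl (fun t i => t.set (m + i) (v.getD i eNode)) t with hT
    refine ⟨by rw [List.length_set, hTlen], fun k => ?_⟩
    rw [tg_set]
    by_cases hjk : m + nn = k
    · subst hjk
      by_cases hin : m + nn < T.length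
      · rw [hTlen] at hin
        rw [if_pos ⟨rfl, by omega⟩,
            if_pos (by omega : m ≤ m + nn ∧ m + nn < m + (nn + 1) ∧ m + nn < t.length),
            Nat.add_sub_cancel_left]
      · rw [hTlen] at hin
        rw [if_neg (by omega ∘ And.right), htg,
            if_neg (by omega : ¬ (m ≤ m + nn ∧ m + nn < m + nn ∧ m + nn < t.length)),
            if_neg (by omega : ¬ (m ≤ m + nn ∧ m + nn < m + (nn + 1) ∧ m + nn < t.length))]
    · rw [if_neg (fun hh => hjk hh.1), htg]
      by_cases hcond : m ≤ k ∧ k < m + nn ∧ k < t.length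
      · rw [if_pos hcond, if_pos (by omega)]
      · rw [if_neg hcond, if_neg (by omega)]

lemma pushupA_nat (t : List Node) (k : Nat) :
    pushupA t (k : Int) =
      t.set k (mergeNode (tg t (2 * k)) (tg t (2 * k + 1))) := by
  unfold pushupA
  rw [(by push_cast; ring : (2 * (k : Int)) = ((2 * k : Nat) : Int)),
      (by push_cast; ring : ((2 * k : Nat) : Int) + 1 = ((2 * k + 1 : Nat) : Int)),
      tgetA_nat, tgetA_nat]
  simp

-- ---- the build loop: descending pushups make every node agree with hv ----

lemma build_fold (m : Nat) (ls : List Node) :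
    ∀ (jj : Nat) (t : List Node), jj < m → t.length = 2 * m →
      (∀ k, jj < k → k < 2 * m → tg t k = hv m ls k) →
      (((PySem.List.pyRange (jj : Int) 0 (-1)).foldl (fun t i => pushupA t i) t).length
          = 2 * m) ∧
      ∀ k, 1 ≤ k → k < 2 * m →
        tg ((PySem.List.pyRange (jj : Int) 0 (-1)).foldl (fun t i => pushupA t i) t) k
          = hv m ls k := by
  intro jj
  induction jj with
  | zero =>
    intro t hjm hlen hok
    rw [(by simp : ((0 : Nat) : Int) = 0), PySem.List.pyRange_neg_one_eq_nil (le_refl 0),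
        List.foldl_nil]
    exact ⟨hlen, fun k h1 h2 => hok k (by omega) h2⟩
  | succ jj ih =>
    intro t hjm hlen hok
    rw [(by push_cast; ring : ((jj + 1 : Nat) : Int) = (jj : Int) + 1),
        PySem.List.pyRange_neg_one_cons (by omega : (0 : Int) < (jj : Int) + 1),
        List.foldl_cons,
        (by ring : ((jj : Int) + 1 - 1) = (jj : Int)),
        (by push_cast; ring : ((jj : Int) + 1) = ((jj + 1 : Nat) : Int)),
        pushupA_nat]
    have hval : tg t (2 * (jj + 1)) = hv m ls (2 * (jj + 1)) := hok _ (by omega) (by omega)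
    have hval2 : tg t (2 * (jj + 1) + 1) = hv m ls (2 * (jj + 1) + 1) :=
      hok _ (by omega) (by omega)
    apply ih
    · omega
    · rw [List.length_set]; exact hlen
    · intro k hk1 hk2
      rw [tg_set]
      by_cases hk : jj + 1 = k
      · subst hk
        rw [if_pos ⟨rfl, by omega⟩, hval, hval2,
            ← hv_node m ls (jj + 1) (by omega) (by omega)]
      · rw [if_neg (fun hh => hk hh.1)]
        exact hok k (by omega) hk2

-- ---- the pushup loop of set(): invariant over the ancestor path ----

def INVp (h : Nat) (ls' : List Node) (q r : Nat) (t : List Node) : Prop :=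
  ∀ k, 1 ≤ k → k < 2 * 2 ^ h →
    (∀ i, r < i → i ≤ h → k ≠ q >>> i) → tg t k = hv (2 ^ h) ls' k

lemma push_loop (h : Nat) (ls' : List Node) (p : Nat) (hp : p < 2 ^ h) :
    ∀ (cnt r : Nat) (t : List Node), r + cnt = h → t.length = 2 * 2 ^ h →
      INVp h ls' (p + 2 ^ h) r t →
      (((List.range' (r + 1) cnt).foldl
          (fun t i => pushupA t (((p + 2 ^ h) >>> i : Nat) : Int)) t).length = 2 * 2 ^ h) ∧
      INVp h ls' (p + 2 ^ h) h
        ((List.range' (r + 1) cnt).foldl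
          (fun t i => pushupA t (((p + 2 ^ h) >>> i : Nat) : Int)) t) := by
  intro cnt
  induction cnt with
  | zero =>
    intro r t hr hlen hinv
    rw [List.range'_zero, List.foldl_nil]
    have : r = h := by omega
    subst this
    exact ⟨hlen, hinv⟩
  | succ cnt ih =>
    intro r t hr hlen hinv
    rw [List.range'_succ, List.foldl_cons, pushupA_nat]
    have hr1 : r + 1 ≤ h := by omega
    have hb := anc_bounds (i := r + 1) (p := p) (h := h) hp hr1
    have hpow1 : (1 : Nat) ≤ 2 ^ (h - (r + 1)) := Nat.one_le_two_pow
    have hband : 2 ^ (h - r) = 2 ^ (h - (r + 1)) * 2 := by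
      rw [← pow_succ]; congr 1; omega
    set q := p + 2 ^ h with hqdef
    set k0 := q >>> (r + 1) with hk0def
    have hk0m : k0 < 2 ^ h := by
      calc k0 < 2 ^ (h - (r + 1)) * 2 := hb.2
      _ = 2 ^ (h - r) := hband.symm
      _ ≤ 2 ^ h := Nat.pow_le_pow_right (by norm_num) (by omega)
    have hchild : ∀ c, 2 * k0 ≤ c → c ≤ 2 * k0 + 1 →
        (∀ i, r < i → i ≤ h → c ≠ q >>> i) := by
      intro c hc1 hc2
      apply band_not_anc hp (by omega : r ≤ h)
      calc 2 ^ (h - r) = 2 ^ (h - (r + 1)) * 2 := hband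
      _ ≤ k0 * 2 := Nat.mul_le_mul_right 2 hb.1
      _ = 2 * k0 := by ring
      _ ≤ c := hc1
    have hcv1 : tg t (2 * k0) = hv (2 ^ h) ls' (2 * k0) :=
      hinv _ (by omega) (by omega) (hchild _ (le_refl _) (by omega))
    have hcv2 : tg t (2 * k0 + 1) = hv (2 ^ h) ls' (2 * k0 + 1) :=
      hinv _ (by omega) (by omega) (hchild _ (by omega) (le_refl _))
    apply ih (r + 1)
    · omega
    · rw [List.length_set]; exact hlen
    · intro k hk1 hk2 hanc
      rw [tg_set]
      by_cases hkk : k0 = k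
      · subst hkk
        rw [if_pos ⟨rfl, by omega⟩, hcv1, hcv2,
            ← hv_node (2 ^ h) ls' k0 (by omega) hk0m]
      · rw [if_neg (fun hh => hkk hh.1)]
        apply hinv k hk1 hk2
        intro i hi1 hi2
        by_cases hi : i = r + 1
        · subst hi; exact fun hh => hkk hh.symm
        · exact hanc i (by omega) hi2

-- ---- correctness of set() ----

lemma set_correct (h : Nat) (ls : List Node) (hls : ls.length = 2 ^ h)
    (p : Nat) (hp : p < 2 ^ h) (x : Node) (t : List Node)
    (hlen : t.length = 2 * 2 ^ h)
    (hok : ∀ k, 1 ≤ k → k < 2 * 2 ^ h → tg t k = hv (2 ^ h) ls k) :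
    (setA ((2 ^ h : Nat) : Int) h t (List.replicate (2 ^ h) none) (p : Int) x).2
        = List.replicate (2 ^ h) none ∧
    (setA ((2 ^ h : Nat) : Int) h t (List.replicate (2 ^ h) none) (p : Int) x).1.length
        = 2 * 2 ^ h ∧
    ∀ k, 1 ≤ k → k < 2 * 2 ^ h →
      tg (setA ((2 ^ h : Nat) : Int) h t (List.replicate (2 ^ h) none) (p : Int) x).1 k
        = hv (2 ^ h) (ls.set p x) k := by
  have hq : (p : Int) + ((2 ^ h : Nat) : Int) = ((p + 2 ^ h : Nat) : Int) := by push_cast; ring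
  have hsh : ∀ k : Nat, ((p + 2 ^ h : Nat) : Int) >>> ((((1 : Int) + (k : Int)).toNat : Nat) : Int)
      = (((p + 2 ^ h) >>> (1 + k) : Nat) : Int) := by
    intro k
    rw [(by omega : ((1 : Int) + (k : Int)).toNat = 1 + k), shift_int2]
  have hrange : PySem.List.pyRange 1 ((h : Int) + 1) 1
      = (List.range h).map (fun k : Nat => (1 : Int) + (k : Int)) := by
    rw [PySem.List.pyRange_one]
    simp
  have hsetA : setA ((2 ^ h : Nat) : Int) h t (List.replicate (2 ^ h) none) (p : Int) x
      = ((List.range' 1 h).foldl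
            (fun t i => pushupA t (((p + 2 ^ h) >>> i : Nat) : Int))
            (t.set (p + 2 ^ h) x),
          List.replicate (2 ^ h) none) := by
    simp only [setA]
    rw [hq, pushdown_fold_id _ _ _ _ (fun i => ((p + 2 ^ h : Nat) : Int) >>> ((i.toNat : Nat) : Int))]
    rw [PySem.List.pySetD_natCast, hrange, List.foldl_map]
    simp only [hsh]
    rw [List.range'_eq_map_range, List.foldl_map]
  rw [hsetA]
  have hinv0 : INVp h (ls.set p x) (p + 2 ^ h) 0 (t.set (p + 2 ^ h) x) := by
    intro k hk1 hk2 hanc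
    rw [tg_set]
    by_cases hk : p + 2 ^ h = k
    · subst hk
      rw [if_pos ⟨rfl, by omega⟩,
          hv_leaf _ _ _ (by omega) (by omega), Nat.add_sub_cancel]
      have hlp : p < ls.length := by omega
      simp [List.getD_eq_getElem?_getD, List.getElem?_set, hlp]
    · rw [if_neg (fun hh => hk hh.1), hok k hk1 hk2]
      refine (hv_indep (2 ^ h) ls p x (2 * 2 ^ h) k (by omega) (by omega) ?_).symm
      intro i
      rcases Nat.eq_zero_or_pos i with hi | hi
      · subst hi; simpa using fun hh => hk hh.symm
      · by_cases hih : i ≤ h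
        · exact hanc i (by omega) hih
        · rw [anc_high i hp (by omega)]; omega
  have hres := push_loop h (ls.set p x) p hp h 0 (t.set (p + 2 ^ h) x)
      (by omega) (by rw [List.length_set]; exact hlen) hinv0
  refine ⟨rfl, hres.1, fun k hk1 hk2 => ?_⟩
  exact hres.2 k hk1 hk2 (fun i hi1 hi2 => absurd hi2 (by omega))

-- ---- B's recursion computes hv ----

lemma goB_eq_hv (cs : List Char) (h : Nat) :
    ∀ (d j : Nat), d ≤ h → j < 2 ^ (h - d) →
      goB cs cs.length d j = hv (2 ^ h) (lsOf cs (2 ^ h)) (2 ^ (h - d) + j) := by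
  intro d
  induction d with
  | zero =>
    intro j hd hj
    rw [Nat.sub_zero] at hj ⊢
    have hpow : (1 : Nat) ≤ 2 ^ h := Nat.one_le_two_pow
    simp only [goB]
    rw [hv_leaf _ _ _ (by omega) (by omega), Nat.add_sub_cancel_left]
    unfold lsOf
    simp only [List.getD_eq_getElem?_getD]
    by_cases hjn : j < cs.length
    · have hjm : j < (cs.map leafOf).length := by simpa
      rw [if_pos hjn, List.getElem?_append_left hjm]
      simp [List.getElem?_eq_getElem hjn, leafOf]
    · rw [if_neg hjn,
          List.getElem?_append_right (by simpa using (by omega : cs.length ≤ j)),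
          List.getElem?_replicate]
      simp only [List.length_map]
      split <;> rfl
  | succ d ih =>
    intro j hd hj
    have he : h - d = (h - (d + 1)) + 1 := by omega
    have hpow : 2 ^ (h - d) = 2 ^ (h - (d + 1)) * 2 := by rw [he, pow_succ]
    simp only [goB]
    rw [ih (2 * j) (by omega) (by omega),
        ih (2 * j + 1) (by omega) (by omega),
        (by omega : 2 ^ (h - d) + 2 * j = 2 * (2 ^ (h - (d + 1)) + j)),
        (by omega : 2 ^ (h - d) + (2 * j + 1) = 2 * (2 ^ (h - (d + 1)) + j) + 1),
        ← hv_node _ _ _ (by positivity)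
          (by
            have : 2 ^ (h - (d + 1)) + j < 2 ^ (h - (d + 1)) * 2 := by omega
            calc 2 ^ (h - (d + 1)) + j < 2 ^ (h - d) := by omega
            _ ≤ 2 ^ h := Nat.pow_le_pow_right (by norm_num) (by omega))]

-- ---- B's height loop = A's bit_length ----

lemma pow2Loop_spec (n : Nat) :
    ∀ (g L : Nat), g ≤ L → n ≤ 2 ^ L → (∀ j, j < L → 2 ^ j < n) → pow2Loop n g = L := by
  intro g L hgL hub hlb
  have key : ∀ (fuel g' : Nat), L - g' ≤ fuel → g' ≤ L → pow2Loop n g' = L := by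
    intro fuel
    induction fuel with
    | zero =>
      intro g' h1 h2
      have : g' = L := by omega
      subst this
      rw [pow2Loop, if_neg (by rw [Nat.one_shiftLeft]; omega)]
    | succ fuel ih =>
      intro g' h1 h2
      by_cases hgl : g' = L
      · subst hgl
        rw [pow2Loop, if_neg (by rw [Nat.one_shiftLeft]; omega)]
      · rw [pow2Loop, if_pos (by rw [Nat.one_shiftLeft]; exact hlb g' (by omega))]
        exact ih (g' + 1) (by omega) (by omega)
  exact key (L - g) g (le_refl _) hgL

lemma pow2Loop_eq_bitLength (n : Nat) (hn : 1 ≤ n) :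
    pow2Loop n 0 = PySem.Int.bitLength (((n : Int)) - 1) := by
  have h1 : ((n : Int) - 1) = ((n - 1 : Nat) : Int) := by omega
  rw [h1]
  set N := n - 1 with hN
  set L := PySem.Int.bitLength ((N : Int)) with hL
  have habs : ((N : Int)).natAbs = N := Int.natAbs_natCast N
  have hub : N < 2 ^ L := by
    have := PySem.Int.lt_two_pow_bitLength ((N : Int))
    rwa [habs] at this
  apply pow2Loop_spec n 0 L (Nat.zero_le L) (by omega)
  intro j hj
  by_cases hN0 : N = 0
  · exfalso
    have : L = 0 := by
      rw [hL, hN0]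
      simp [PySem.Int.bitLength_zero]
    omega
  · have hlow := PySem.Int.two_pow_bitLength_le ((N : Int)) (by exact_mod_cast hN0)
    rw [habs] at hlow
    have hL1 : 1 ≤ L := by
      by_contra hc
      have : L = 0 := by omega
      rw [this] at hub
      omega
    calc 2 ^ j ≤ 2 ^ (L - 1) := Nat.pow_le_pow_right (by norm_num) (by omega)
    _ ≤ N := hlow
    _ < n := by omega

-- ---- the padded leaf row after one character update ----

lemma lsOf_set (cs : List Char) (m : Nat) (p : Nat) (hp : p < cs.length) (c : Char) :
    lsOf (cs.set p c) m = (lsOf cs m).set p (leafOf c) := by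
  unfold lsOf
  rw [List.map_set, List.length_set,
      List.set_append_left _ _ (by simpa using hp)]

-- ---- the query loop, both sides in lockstep ----

lemma loop_lemma (h : Nat) (n : Nat) (hnm : n ≤ 2 ^ h) :
    ∀ (qps : List (Int × Char)) (cs : List Char) (t : List Node) (ans : List Int),
      cs.length = n →
      (∀ pr ∈ qps, 0 ≤ pr.1 ∧ pr.1 < (n : Int)) →
      t.length = 2 * 2 ^ h →
      (∀ k, 1 ≤ k → k < 2 * 2 ^ h → tg t k = hv (2 ^ h) (lsOf cs (2 ^ h)) k) →
      (qps.foldl (fun st pr =>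
          let tl := setA ((2 ^ h : Nat) : Int) h st.1 st.2.1 pr.1
              (mkData (String.ofList [pr.2]))
          (tl.1, tl.2, st.2.2 ++ [(tgetA tl.1 1).maxL]))
        (t, List.replicate (2 ^ h) none, ans)).2.2
      = (qps.foldl (fun st q =>
          let cs := PySem.List.pySetD st.1 q.1 q.2
          (cs, st.2 ++ [(goB cs n h 0).maxL])) (cs, ans)).2 := by
  intro qps
  induction qps with
  | nil => intro cs t ans hcs hq hlen hok; rfl
  | cons pr qps ih =>
    intro cs t ans hcs hq hlen hok
    obtain ⟨idx, ch⟩ := pr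
    obtain ⟨hi0, hin⟩ := hq (idx, ch) List.mem_cons_self
    set p := idx.toNat with hpdef
    have hidx : (p : Int) = idx := Int.toNat_of_nonneg hi0
    have hpn : p < n := by omega
    have hp2 : p < 2 ^ h := by omega
    have hpow1 : (1 : Nat) ≤ 2 ^ h := Nat.one_le_two_pow
    have hls_len : (lsOf cs (2 ^ h)).length = 2 ^ h := by
      unfold lsOf
      simp [hcs]
      omega
    have hsc := set_correct h (lsOf cs (2 ^ h)) hls_len p hp2
      (mkData (String.ofList [ch])) t hlen hok
    rw [List.foldl_cons, List.foldl_cons]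
    simp only [← hidx]
    have hcs' : PySem.List.pySetD cs ((p : Int)) ch = cs.set p ch := by
      rw [PySem.List.pySetD_natCast]
    have hlsset : lsOf (cs.set p ch) (2 ^ h)
        = (lsOf cs (2 ^ h)).set p (mkData (String.ofList [ch])) :=
      lsOf_set cs (2 ^ h) p (by omega) ch
    have hval : (tgetA (setA ((2 ^ h : Nat) : Int) h t (List.replicate (2 ^ h) none)
          ((p : Int)) (mkData (String.ofList [ch]))).1 1).maxL
        = (goB (cs.set p ch) n h 0).maxL := by
      rw [(by simp : (1 : Int) = ((1 : Nat) : Int)), tgetA_nat]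
      have hn' : n = (cs.set p ch).length := by rw [List.length_set, hcs]
      rw [hsc.2.2 1 (le_refl _) (by omega), ← hlsset,
          hn', goB_eq_hv (cs.set p ch) h h 0 (le_refl h) (by simp)]
      simp
    rw [hcs', hval, hsc.1]
    apply ih (cs.set p ch) _ _ (by rw [List.length_set, hcs])
      (fun pr hpr => hq pr (List.mem_cons_of_mem _ hpr)) hsc.2.1
    intro k hk1 hk2
    rw [hlsset]
    exact hsc.2.2 k hk1 hk2

-- ---- A's indexed query loop is the fold over the zipped queries ----

lemma index_fold_eq_zip {α : Type} (qi : List Int) (qct : List Char)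
    (hle : qi.length ≤ qct.length) (F : α → Int × Char → α) (init : α) :
    (List.range qi.length).foldl (fun st k => F st (qi.getD k 0, qct.getD k ' ')) init
      = (qi.zip qct).foldl F init := by
  suffices hmap : (List.range qi.length).map (fun k => (qi.getD k 0, qct.getD k ' '))
      = qi.zip qct by
    rw [← hmap, List.foldl_map]
  apply List.ext_getElem
  · simp [List.length_zip]
    omega
  · intro i h1 h2
    simp only [List.getElem_map, List.getElem_range, List.getElem_zip]
    have hi1 : i < qi.length := by simpa using h1
    rw [List.getD_eq_getElem _ _ hi1, List.getD_eq_getElem _ _ (by omega : i < qct.length)]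

lemma loop_lemma_idx (h n : Nat) (hnm : n ≤ 2 ^ h) (qi : List Int) (qct : List Char)
    (hle : qi.length ≤ qct.length) (hq : ∀ i ∈ qi, 0 ≤ i ∧ i < (n : Int))
    (cs : List Char) (t : List Node) (hcs : cs.length = n)
    (hlen : t.length = 2 * 2 ^ h)
    (hok : ∀ k, 1 ≤ k → k < 2 * 2 ^ h → tg t k = hv (2 ^ h) (lsOf cs (2 ^ h)) k) :
    ((List.range qi.length).foldl (fun st k =>
        let tl := setA ((2 ^ h : Nat) : Int) h st.1 st.2.1 (qi.getD k 0)
            (mkData (String.ofList [qct.getD k ' ']))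
        (tl.1, tl.2, st.2.2 ++ [(tgetA tl.1 1).maxL]))
      (t, List.replicate (2 ^ h) none, ([] : List Int))).2.2
    = ((qi.zip qct).foldl (fun st q =>
        let cs' := PySem.List.pySetD st.1 q.1 q.2
        (cs', st.2 ++ [(goB cs' n h 0).maxL])) (cs, ([] : List Int))).2 := by
  rw [index_fold_eq_zip qi qct hle (fun st pr =>
      let tl := setA ((2 ^ h : Nat) : Int) h st.1 st.2.1 pr.1
          (mkData (String.ofList [pr.2]))
      (tl.1, tl.2, st.2.2 ++ [(tgetA tl.1 1).maxL]))]
  exact loop_lemma h n hnm (qi.zip qct) cs t []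
    hcs (fun pr hpr => hq pr.1 (List.of_mem_zip hpr).1) hlen hok

-- ===== VERDICT (by name: the statement is the Claim_ definition above) =====
theorem longestRepeating_spec : Claim_equal_longestRepeating := by
  unfold Claim_equal_longestRepeating Spec_longestRepeating
  intro s qc qi hdom hpre
  obtain ⟨hle, hbound⟩ := hpre
  unfold longestRepeating longestRepeating_alt
  by_cases hn : s.toList.length = 0
  · have hqi : qi = [] := by
      cases qi with
      | nil => rfl
      | cons a l =>
        have := hbound a (by simp)
        rw [hn] at this
        omega
    subst hqi
    simp [PySem.List.len_eq, PySem.List.pyRange_one_eq_nil]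
  · have hn1 : 1 ≤ s.toList.length := by omega
    have e1 : PySem.List.len (s.toList.map (fun c => mkData (String.ofList [c]))) - 1
        = ((s.toList.length : Int) - 1) := by
      rw [PySem.List.len_eq, List.length_map]
    set n := s.toList.length with hndef
    set H := PySem.Int.bitLength ((n : Int) - 1) with hH
    have e2 : pow2Loop n 0 = H := pow2Loop_eq_bitLength n hn1
    have hnm : n ≤ 2 ^ H := by
      have h1 : ((n : Int) - 1) = ((n - 1 : Nat) : Int) := by omega
      have h2 := PySem.Int.lt_two_pow_bitLength ((n : Int) - 1)
      rw [h1, Int.natAbs_natCast] at h2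
      have hH' := hH
      rw [h1] at hH'
      rw [← hH'] at h2
      omega
    have hp1 : (1 : Nat) ≤ 2 ^ H := Nat.one_le_two_pow
    simp only [PySem.List.len_eq, List.length_map, ← hndef, ← hH, e2, Nat.one_shiftLeft,
      PySem.List.pyRepeat_singleton,
      (by omega : ((2 : Int) * ((2 ^ H : Nat) : Int)).toNat = 2 * 2 ^ H),
      (by omega : (((2 ^ H : Nat) : Int)).toNat = 2 ^ H),
      (by omega : ((2 ^ H : Nat) : Int) - 1 = ((2 ^ H - 1 : Nat) : Int)),
      PySem.List.pyRange_zero_nat, List.foldl_map,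
      (show ∀ k : Nat, ((2 ^ H : Nat) : Int) + (k : Int) = (((2 ^ H + k) : Nat) : Int)
        from fun k => by push_cast; ring),
      PySem.List.pySetD_natCast, PySem.List.pyGetD_natCast]
    have hleafok : ∀ (k : Nat), 2 ^ H - 1 < k → k < 2 * 2 ^ H →
        tg ((List.range n).foldl
            (fun t i => t.set (2 ^ H + i)
              ((s.toList.map (fun c => mkData (String.ofList [c]))).getD i eNode))
            (List.replicate (2 * 2 ^ H) eNode)) k
          = hv (2 ^ H) (lsOf s.toList (2 ^ H)) k := by
      intro k hk1 hk2
      rw [(leaf_fold _ _ n _).2 k, hv_leaf _ _ _ (by omega) (by omega)]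
      unfold lsOf
      rw [← hndef]
      by_cases hkn : k < 2 ^ H + n
      · rw [if_pos ⟨by omega, hkn, by rw [List.length_replicate]; omega⟩,
            List.getD_eq_getElem?_getD, List.getD_eq_getElem?_getD,
            List.getElem?_append_left (by rw [List.length_map]; omega)]
        rfl
      · rw [if_neg (fun hcon => absurd hcon.2.1 (by omega))]
        have hrep : tg (List.replicate (2 * 2 ^ H) eNode) k = eNode := by
          simp only [tg, List.getD_eq_getElem?_getD, List.getElem?_replicate]
          split <;> rfl
        rw [hrep, List.getD_eq_getElem?_getD,
            List.getElem?_append_right (by rw [List.length_map]; omega),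
            List.getElem?_replicate]
        simp only [List.length_map]
        split <;> rfl
    refine loop_lemma_idx H n hnm qi qc.toList hle hbound s.toList _ hndef.symm ?_ ?_
    · refine (build_fold (2 ^ H) (lsOf s.toList (2 ^ H)) (2 ^ H - 1) _ (by omega) ?_
        hleafok).1
      rw [(leaf_fold _ _ n _).1, List.length_replicate]
    · refine (build_fold (2 ^ H) (lsOf s.toList (2 ^ H)) (2 ^ H - 1) _ (by omega) ?_
        hleafok).2
      rw [(leaf_fold _ _ n _).1, List.length_replicate]
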